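-- pv_equiv track=rewrite | github.com/filojiston/codewars-solutions | infected-zeroes.py | infected_zeroes
-- ===== SOURCE A (Python) =====
-- def infected_zeroes(lst):
--     queue = [i for i, x in enumerate(lst) if x == 0]
--     turns = 0
--     while queue:
--         for _ in range(len(queue)):
--             idx = queue.pop(0)
--             for adj_idx in [idx-1, idx+1]:
--                 if 0 <= adj_idx < len(lst) and lst[adj_idx] != 0:
--                     lst[adj_idx] = 0
--                     queue.append(adj_idx)
--         turns += 1
--     return turns - 1
-- ===== SOURCE B (Python) =====
-- def infected_zeroes(lst):
--     zeros = [i for i, x in enumerate(lst) if x == 0]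
--     if not zeros:
--         return -1
--     return max(min(abs(i - j) for j in zeros) for i in range(len(lst)))
-- ===== Notes on version B (the rewrite author's own statement) =====
-- stated objective: simpler
-- what changed: Replaces A's mutating BFS flood-fill simulation (queue of freshly infected cells, counting rounds) with a direct computation: the answer is the maximum over all cells of the distance to the nearest zero, -1 if there is no zero; B also does not mutate the input list.
import Mathlib
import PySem

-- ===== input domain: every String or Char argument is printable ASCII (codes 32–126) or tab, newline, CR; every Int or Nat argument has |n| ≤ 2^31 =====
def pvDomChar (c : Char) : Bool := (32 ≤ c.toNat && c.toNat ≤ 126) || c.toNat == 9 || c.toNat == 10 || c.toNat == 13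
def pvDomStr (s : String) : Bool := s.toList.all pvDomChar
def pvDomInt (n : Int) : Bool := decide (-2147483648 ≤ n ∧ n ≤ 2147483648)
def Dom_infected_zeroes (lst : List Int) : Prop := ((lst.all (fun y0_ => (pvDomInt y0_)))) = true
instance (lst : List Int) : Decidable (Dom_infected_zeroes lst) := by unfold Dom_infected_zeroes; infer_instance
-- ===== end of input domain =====

-- B replaces A's mutating BFS flood-fill simulation by a direct nearest-zero-distance maximum;
-- equivalence is about the RETURN value only (A zeroes out lst in place, B does not mutate it).

-- shared comprehension '[i for i, x in enumerate(lst) if x == 0]' (identical line in A and B)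
def azZeros (lst : List Int) : List Int :=
  (PySem.List.enumerate lst 0).filterMap (fun p => if p.2 = 0 then some p.1 else none)

-- ===== PORT A =====
-- body of 'for adj_idx in [idx-1, idx+1]: if 0 <= adj_idx < len(lst) and lst[adj_idx] != 0: ...'
def azProcess (s : List Int × List Int) (adj : Int) : List Int × List Int :=
  if 0 ≤ adj ∧ adj < (s.1.length : Int) ∧ PySem.List.pyGetD s.1 adj 0 ≠ 0 then
    (PySem.List.pySetD s.1 adj 0, s.2 ++ [adj])
  else s

-- 'for _ in range(len(queue)): idx = queue.pop(0); ...'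
def azRound : Nat → List Int × List Int → List Int × List Int
  | 0, s => s
  | Nat.succ k, (lst, queue) =>
    match queue with
    | [] => (lst, [])        -- totality guard, never reached: a round pops at most len(queue) items
    | idx :: rest => azRound k (azProcess (azProcess (lst, rest) (idx - 1)) (idx + 1))

def azMeasure (s : List Int × List Int) : Nat :=
  s.2.length + 2 * s.1.countP (fun x => decide (x ≠ 0))

theorem azCountP_set (xs : List Int) (n : Nat) (h : n < xs.length) (hx : xs[n] ≠ 0) :
    (xs.set n 0).countP (fun x => decide (x ≠ 0)) + 1 = xs.countP (fun x => decide (x ≠ 0)) := by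
  induction xs generalizing n with
  | nil => simp at h
  | cons a t ih =>
    cases n with
    | zero => simp_all
    | succ m =>
      simp only [List.set_cons_succ, List.countP_cons]
      have := ih m (by simpa using h) (by simpa using hx)
      omega

theorem azProcess_measure (s : List Int × List Int) (adj : Int) :
    azMeasure (azProcess s adj) ≤ azMeasure s := by
  obtain ⟨l, q⟩ := s
  unfold azProcess azMeasure
  split_ifs with h
  · obtain ⟨h0, h1, h2⟩ := h
    simp only at *
    have hlt : adj.toNat < l.length := by omega
    have hel : l[adj.toNat] ≠ 0 := by
      rw [PySem.List.pyGetD_of_nonneg l 0 h0, List.getD_eq_getElem l 0 hlt] at h2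
      exact h2
    have hc := azCountP_set l adj.toNat hlt hel
    rw [PySem.List.pySetD_of_nonneg l 0 h0]
    simp only [List.length_append, List.length_singleton]
    omega
  · exact le_refl _

theorem azRound_measure (k : Nat) (s : List Int × List Int) :
    azMeasure (azRound k s) ≤ azMeasure s := by
  induction k generalizing s with
  | zero => simp [azRound]
  | succ k ih =>
    obtain ⟨l, q⟩ := s
    cases q with
    | nil => simp [azRound, azMeasure]
    | cons idx rest =>
      have h1 := azProcess_measure (azProcess (l, rest) (idx - 1)) (idx + 1)
      have h2 := azProcess_measure (l, rest) (idx - 1)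
      have h3 := ih (azProcess (azProcess (l, rest) (idx - 1)) (idx + 1))
      have hm : azMeasure (l, rest) + 1 = azMeasure (l, idx :: rest) := by
        simp only [azMeasure, List.length_cons]; omega
      simp only [azRound]
      omega

theorem azRound_measure_lt (k : Nat) (s : List Int × List Int)
    (hk : 1 ≤ k) (hq : s.2 ≠ []) : azMeasure (azRound k s) < azMeasure s := by
  obtain ⟨l, q⟩ := s
  cases q with
  | nil => simp at hq
  | cons idx rest =>
    obtain ⟨k, rfl⟩ : ∃ k', k = k' + 1 := ⟨k - 1, by omega⟩
    have h1 := azProcess_measure (azProcess (l, rest) (idx - 1)) (idx + 1)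
    have h2 := azProcess_measure (l, rest) (idx - 1)
    have h3 := azRound_measure k (azProcess (azProcess (l, rest) (idx - 1)) (idx + 1))
    have hm : azMeasure (l, rest) + 1 = azMeasure (l, idx :: rest) := by
      simp only [azMeasure, List.length_cons]; omega
    simp only [azRound]
    omega

-- 'while queue: ... turns += 1'
def azWhile (lst : List Int) (queue : List Int) (turns : Int) : Int :=
  if h : queue = [] then turns - 1
  else
    let s := azRound queue.length (lst, queue)
    azWhile s.1 s.2 (turns + 1)
termination_by azMeasure (lst, queue)
decreasing_by
  exact azRound_measure_lt queue.length (lst, queue) (by simpa [Nat.one_le_iff_ne_zero, List.length_eq_zero_iff] using h) h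

def infected_zeroes (lst : List Int) : Int :=
  azWhile lst (azZeros lst) 0

-- ===== PORT B =====
def infected_zeroes_alt (lst : List Int) : Int :=
  let zeros := azZeros lst
  if zeros = [] then -1
  else
    -- 'max(min(abs(i - j) for j in zeros) for i in range(len(lst)))'; the .getD 0 defaults are
    -- totality guards for the empty-sequence ValueError, unreachable since zeros ≠ [] and len ≥ 1
    (PySem.List.max? ((PySem.List.pyRange 0 (lst.length : Int) 1).map
      (fun i => (PySem.List.min? (zeros.map (fun j => |i - j|)) (fun v => v)).getD 0)) (fun v => v)).getD 0

-- ===== PRECONDITION & SPEC =====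
def Spec_infected_zeroes (lst : List Int) (out : Int) : Prop := out = infected_zeroes_alt lst
instance (lst : List Int) (out : Int) : Decidable (Spec_infected_zeroes lst out) := by unfold Spec_infected_zeroes; infer_instance

-- ===== CLAIM (what is proved, stated in full; the proofs are below) =====
def Claim_equal_infected_zeroes : Prop := ∀ (lst : List Int), Dom_infected_zeroes lst → Spec_infected_zeroes lst (infected_zeroes lst)

-- ===== LEMMAS AND PROOFS =====

-- distance of cell i to the nearest zero of L (B's inner min), and B's maximum
def azD (L : List Int) (i : Int) : Int :=
  (PySem.List.min? ((azZeros L).map (fun j => |i - j|)) (fun v => v)).getD 0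

def azM (L : List Int) : Int :=
  (PySem.List.max? ((PySem.List.pyRange 0 (L.length : Int) 1).map (fun i => azD L i)) (fun v => v)).getD 0

theorem alt_eq (L : List Int) :
    infected_zeroes_alt L = if azZeros L = [] then -1 else azM L := rfl

theorem mem_azZeros {L : List Int} {j : Int} :
    j ∈ azZeros L ↔ ∃ k : Nat, ∃ _ : k < L.length, L[k] = 0 ∧ j = (k : Int) := by
  unfold azZeros
  simp only [List.mem_filterMap, PySem.List.mem_enumerate_iff]
  constructor
  · rintro ⟨p, ⟨k, hk, rfl⟩, hp⟩
    simp only at hp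
    by_cases h : L[k] = 0
    · simp only [h, if_pos, Option.some.injEq] at hp
      exact ⟨k, hk, h, by omega⟩
    · simp [h] at hp
  · rintro ⟨k, hk, h0, rfl⟩
    exact ⟨(0 + (k : Int), L[k]), ⟨k, hk, rfl⟩, by simp [h0]⟩

theorem azZeros_range {L : List Int} {j : Int} (hj : j ∈ azZeros L) :
    0 ≤ j ∧ j < (L.length : Int) := by
  obtain ⟨k, hk, _, rfl⟩ := mem_azZeros.1 hj
  exact ⟨Int.natCast_nonneg k, by exact_mod_cast hk⟩

theorem pyGetD_zero_iff_mem {L : List Int} {i : Int} (h0 : 0 ≤ i) (h1 : i < (L.length : Int)) :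
    PySem.List.pyGetD L i 0 = 0 ↔ i ∈ azZeros L := by
  have hlt : i.toNat < L.length := by omega
  rw [PySem.List.pyGetD_of_nonneg L 0 h0, List.getD_eq_getElem L 0 hlt, mem_azZeros]
  constructor
  · intro h; exact ⟨i.toNat, hlt, h, by omega⟩
  · rintro ⟨k, hk, h0', rfl⟩
    simpa using h0' 

theorem azD_le {L : List Int} {i j : Int} (hj : j ∈ azZeros L) : azD L i ≤ |i - j| := by
  unfold azD
  cases hmin : PySem.List.min? ((azZeros L).map fun j => |i - j|) (fun v => v) with
  | none =>
    rw [PySem.List.min?_eq_none_iff, List.map_eq_nil_iff] at hmin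
    rw [hmin] at hj; simp at hj
  | some m =>
    have := PySem.List.min?_isMin hmin (|i - j|) (List.mem_map_of_mem hj)
    simpa using this

theorem azD_exists {L : List Int} (hz : azZeros L ≠ []) (i : Int) :
    ∃ j ∈ azZeros L, azD L i = |i - j| := by
  unfold azD
  cases hmin : PySem.List.min? ((azZeros L).map fun j => |i - j|) (fun v => v) with
  | none =>
    rw [PySem.List.min?_eq_none_iff, List.map_eq_nil_iff] at hmin
    exact absurd hmin hz
  | some m =>
    have hm := PySem.List.min?_mem hmin
    simp only [List.mem_map] at hm
    obtain ⟨j, hj, he⟩ := hm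
    exact ⟨j, hj, by simp [← he]⟩

theorem azD_nonneg {L : List Int} (hz : azZeros L ≠ []) (i : Int) : 0 ≤ azD L i := by
  obtain ⟨j, _, he⟩ := azD_exists hz i
  rw [he]; exact abs_nonneg _

theorem azD_zero_iff {L : List Int} (_hz : azZeros L ≠ []) (i : Int) :
    azD L i = 0 ↔ i ∈ azZeros L := by
  constructor
  · intro h
    obtain ⟨j, hj, he⟩ := azD_exists _hz i
    have : i = j := by rw [h] at he; have := abs_eq_zero.1 he.symm; omega
    rwa [this]
  · intro h
    have h1 := azD_le (i := i) h
    have h2 := azD_nonneg _hz i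
    simp only [sub_self, abs_zero] at h1
    omega

theorem azD_lipschitz {L : List Int} (hz : azZeros L ≠ []) (i i' : Int) :
    azD L i ≤ azD L i' + |i - i'| := by
  obtain ⟨j, hj, he⟩ := azD_exists hz i'
  have h1 := azD_le (i := i) hj
  have h2 : |i - j| ≤ |i - i'| + |i' - j| := abs_sub_le i i' j
  linarith

theorem azD_step {L : List Int} (hz : azZeros L ≠ []) {i : Int}
    (h0 : 0 ≤ i) (h1 : i < (L.length : Int)) (hd : 1 ≤ azD L i) :
    ∃ a, (a = i - 1 ∨ a = i + 1) ∧ 0 ≤ a ∧ a < (L.length : Int) ∧ azD L a = azD L i - 1 := by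
  obtain ⟨j, hj, he⟩ := azD_exists hz i
  obtain ⟨hj0, hj1⟩ := azZeros_range hj
  have habs : 1 ≤ |i - j| := he ▸ hd
  have hne : i ≠ j := by
    intro h; rw [h] at habs; simp at habs
  by_cases hlt : j < i
  · have hij : azD L i = i - j := by rw [he, abs_of_nonneg (by omega)]
    have h1 : azD L (i - 1) ≤ i - 1 - j := by
      have := azD_le (i := i - 1) hj
      rwa [abs_of_nonneg (by omega)] at this
    have h2 : azD L i ≤ azD L (i - 1) + 1 := by
      have := azD_lipschitz hz i (i - 1)
      rwa [show |i - (i - 1)| = 1 by norm_num] at this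
    exact ⟨i - 1, Or.inl rfl, by omega, by omega, by omega⟩
  · have hgt : i < j := by omega
    have hij : azD L i = j - i := by rw [he, abs_of_nonpos (by omega)]; ring
    have h1 : azD L (i + 1) ≤ j - i - 1 := by
      have := azD_le (i := i + 1) hj
      rwa [abs_of_nonpos (by omega), show -(i + 1 - j) = j - i - 1 by ring] at this
    have h2 : azD L i ≤ azD L (i + 1) + 1 := by
      have := azD_lipschitz hz i (i + 1)
      rwa [show |i - (i + 1)| = 1 by norm_num] at this
    exact ⟨i + 1, Or.inr rfl, by omega, by omega, by omega⟩

theorem azM_ge {L : List Int} (_hz : azZeros L ≠ []) {i : Int}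
    (h0 : 0 ≤ i) (h1 : i < (L.length : Int)) : azD L i ≤ azM L := by
  have hmem : azD L i ∈ ((PySem.List.pyRange 0 (L.length : Int) 1).map fun i => azD L i) :=
    List.mem_map_of_mem (PySem.List.mem_pyRange_one.2 ⟨h0, h1⟩)
  cases hmax : PySem.List.max? ((PySem.List.pyRange 0 (L.length : Int) 1).map fun i => azD L i) (fun v => v) with
  | none =>
    rw [PySem.List.max?_eq_none_iff] at hmax
    rw [hmax] at hmem; simp at hmem
  | some m =>
    have hM : azM L = m := by unfold azM; rw [hmax]; rfl
    rw [hM]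
    exact PySem.List.max?_isMax hmax _ hmem

theorem azM_exists {L : List Int} (hz : azZeros L ≠ []) :
    ∃ i, 0 ≤ i ∧ i < (L.length : Int) ∧ azD L i = azM L := by
  obtain ⟨j, hj⟩ := List.exists_mem_of_ne_nil _ hz
  obtain ⟨hj0, hj1⟩ := azZeros_range hj
  cases hmax : PySem.List.max? ((PySem.List.pyRange 0 (L.length : Int) 1).map fun i => azD L i) (fun v => v) with
  | none =>
    rw [PySem.List.max?_eq_none_iff, List.map_eq_nil_iff] at hmax
    have : j ∈ PySem.List.pyRange 0 (L.length : Int) 1 := PySem.List.mem_pyRange_one.2 ⟨hj0, hj1⟩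
    rw [hmax] at this; simp at this
  | some m =>
    have hM : azM L = m := by unfold azM; rw [hmax]; rfl
    have hm := PySem.List.max?_mem hmax
    simp only [List.mem_map] at hm
    obtain ⟨i, hi, he⟩ := hm
    obtain ⟨hi0, hi1⟩ := PySem.List.mem_pyRange_one.1 hi
    exact ⟨i, hi0, hi1, by rw [hM, he]⟩

theorem exists_level {L : List Int} (hz : azZeros L ≠ []) :
    ∀ (d : Nat) (r : Int), 0 ≤ r → r + d = azM L → ∃ i, 0 ≤ i ∧ i < (L.length : Int) ∧ azD L i = r := by
  intro d
  induction d with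
  | zero =>
    intro r _ hr
    obtain ⟨i, h0, h1, hd⟩ := azM_exists hz
    exact ⟨i, h0, h1, by push_cast at hr; omega⟩
  | succ d ih =>
    intro r hr0 hr
    obtain ⟨i, h0, h1, hd⟩ := ih (r + 1) (by omega) (by push_cast at hr ⊢; omega)
    obtain ⟨a, _, ha0, ha1, hae⟩ := azD_step hz h0 h1 (by omega)
    exact ⟨a, ha0, ha1, by omega⟩

theorem azGetSet (l : List Int) {i adj : Int} (h0 : 0 ≤ adj) (h1 : adj < (l.length : Int)) (hi0 : 0 ≤ i) :
    PySem.List.pyGetD (PySem.List.pySetD l adj 0) i 0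
      = if i = adj then 0 else PySem.List.pyGetD l i 0 := by
  have hadj : adj = ((adj.toNat : Nat) : Int) := by omega
  by_cases h : i = adj
  · subst h
    rw [hadj, PySem.List.pyGetD_pySetD_natCast _ _ _ _ _ (by omega)]
    simp
  · have hi : i = ((i.toNat : Nat) : Int) := by omega
    rw [if_neg h, hi, hadj, PySem.List.pyGetD_pySetD_natCast _ _ _ _ _ (by omega),
      if_neg (by omega : ¬ i.toNat = adj.toNat)]

-- one neighbour check of A's inner loop, relative to the mid-round state
theorem azProcess_spec (L : List Int) (hz : azZeros L ≠ []) (r : Int)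
    (l R A : List Int) (idx adj : Int)
    (hlen : l.length = L.length)
    (hidx : azD L idx = r)
    (hadj : adj = idx - 1 ∨ adj = idx + 1)
    (hA : ∀ a ∈ A, 0 ≤ a ∧ a < (L.length : Int) ∧ azD L a = r + 1)
    (hchar : ∀ i : Int, 0 ≤ i → i < (L.length : Int) →
      (PySem.List.pyGetD l i 0 = 0 ↔ (azD L i ≤ r ∨ i ∈ A))) :
    ∃ A', azProcess (l, R ++ A) adj = ((azProcess (l, R ++ A) adj).1, R ++ A') ∧
      (azProcess (l, R ++ A) adj).1.length = L.length ∧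
      (∀ a ∈ A, a ∈ A') ∧
      (∀ a ∈ A', 0 ≤ a ∧ a < (L.length : Int) ∧ azD L a = r + 1) ∧
      (∀ i : Int, 0 ≤ i → i < (L.length : Int) →
        (PySem.List.pyGetD (azProcess (l, R ++ A) adj).1 i 0 = 0 ↔ (azD L i ≤ r ∨ i ∈ A'))) ∧
      (0 ≤ adj → adj < (L.length : Int) → azD L adj = r + 1 → adj ∈ A') := by
  have habs : |adj - idx| = 1 := by
    rcases hadj with rfl | rfl
    · rw [show idx - 1 - idx = -1 by ring]; norm_num
    · rw [show idx + 1 - idx = 1 by ring]; norm_num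
  unfold azProcess
  simp only []
  split_ifs with hg
  · obtain ⟨hg0, hg1, hg2⟩ := hg
    have hg1L : adj < (L.length : Int) := by rw [hlen] at hg1; exact hg1
    have hnor : ¬ (azD L adj ≤ r ∨ adj ∈ A) := fun hc => hg2 ((hchar adj hg0 hg1L).2 hc)
    push Not at hnor
    obtain ⟨hDgt, hAnot⟩ := hnor
    have hDeq : azD L adj = r + 1 := by
      have := azD_lipschitz hz adj idx
      rw [habs, hidx] at this
      omega
    refine ⟨A ++ [adj], ?_, ?_, ?_, ?_, ?_, ?_⟩
    · simp only [List.append_assoc]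
    · simp [PySem.List.length_pySetD, hlen]
    · intro a ha; exact List.mem_append_left _ ha
    · intro a ha
      rcases List.mem_append.1 ha with h | h
      · exact hA a h
      · rw [List.mem_singleton] at h; subst h
        exact ⟨hg0, hg1L, hDeq⟩
    · intro i hi0 hi1
      rw [azGetSet l hg0 hg1 hi0]
      by_cases hieq : i = adj
      · subst hieq
        rw [if_pos rfl]
        constructor
        · intro _; exact Or.inr (List.mem_append_right _ (List.mem_singleton.2 rfl))
        · intro _; rfl
      · rw [if_neg hieq, hchar i hi0 hi1]
        constructor
        · rintro (h | h)
          · exact Or.inl h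
          · exact Or.inr (List.mem_append_left _ h)
        · rintro (h | h)
          · exact Or.inl h
          · rcases List.mem_append.1 h with h' | h'
            · exact Or.inr h'
            · rw [List.mem_singleton] at h'; exact absurd h' hieq
    · intro _ _ _
      exact List.mem_append_right _ (List.mem_singleton.2 rfl)
  · refine ⟨A, rfl, hlen, fun a ha => ha, hA, hchar, ?_⟩
    intro ha0 ha1 hD
    push Not at hg
    have hz0 : PySem.List.pyGetD l adj 0 = 0 := by
      by_contra hne
      exact hne (by
        have := hg ha0 (by rw [hlen]; exact ha1)
        simpa using this)
    rcases (hchar adj ha0 ha1).1 hz0 with h | h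
    · omega
    · exact h

theorem azRound_spec (L : List Int) (hz : azZeros L ≠ []) (r : Int) (hr : 0 ≤ r) :
    ∀ (R A l : List Int),
      l.length = L.length →
      (∀ i ∈ R, 0 ≤ i ∧ i < (L.length : Int) ∧ azD L i = r) →
      (∀ a ∈ A, 0 ≤ a ∧ a < (L.length : Int) ∧ azD L a = r + 1) →
      (∀ i : Int, 0 ≤ i → i < (L.length : Int) →
        (PySem.List.pyGetD l i 0 = 0 ↔ (azD L i ≤ r ∨ i ∈ A))) →
      (∀ i : Int, 0 ≤ i → i < (L.length : Int) → azD L i = r + 1 →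
        (∃ a, (a = i - 1 ∨ a = i + 1) ∧ 0 ≤ a ∧ a < (L.length : Int) ∧ azD L a = r ∧ a ∉ R) → i ∈ A) →
      (azRound R.length (l, R ++ A)).1.length = L.length ∧
      (∀ i : Int, 0 ≤ i → i < (L.length : Int) →
        (PySem.List.pyGetD (azRound R.length (l, R ++ A)).1 i 0 = 0 ↔ azD L i ≤ r + 1)) ∧
      (∀ i : Int, i ∈ (azRound R.length (l, R ++ A)).2 ↔ 0 ≤ i ∧ i < (L.length : Int) ∧ azD L i = r + 1) := by
  intro R
  induction R with
  | nil =>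
    intro A l hlen hR hA hchar hprog
    simp only [List.length_nil, List.nil_append, azRound]
    have hfin : ∀ i : Int, 0 ≤ i → i < (L.length : Int) → azD L i = r + 1 → i ∈ A := by
      intro i h0 h1 hD
      refine hprog i h0 h1 hD ?_
      obtain ⟨a, hc, ha0, ha1, hae⟩ := azD_step hz h0 h1 (by omega)
      exact ⟨a, hc, ha0, ha1, by omega, by simp⟩
    refine ⟨hlen, ?_, ?_⟩
    · intro i h0 h1
      rw [hchar i h0 h1]
      constructor
      · rintro (h | h)
        · omega
        · exact le_of_eq (hA i h).2.2
      · intro h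
        by_cases hle : azD L i ≤ r
        · exact Or.inl hle
        · exact Or.inr (hfin i h0 h1 (by omega))
    · intro i
      constructor
      · intro hi; exact hA i hi
      · rintro ⟨h0, h1, hD⟩
        exact hfin i h0 h1 hD
  | cons idx R' ih =>
    intro A l hlen hR hA hchar hprog
    have hidx := (hR idx List.mem_cons_self).2.2
    obtain ⟨A1, heq1, hlen1, hsub1, hA1, hchar1, hg1⟩ :=
      azProcess_spec L hz r l R' A idx (idx - 1) hlen hidx (Or.inl rfl) hA hchar
    simp only [List.cons_append, List.length_cons, azRound]
    rw [heq1]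
    obtain ⟨A2, heq2, hlen2, hsub2, hA2, hchar2, hg2⟩ :=
      azProcess_spec L hz r ((azProcess (l, R' ++ A) (idx - 1)).1) R' A1 idx (idx + 1)
        hlen1 hidx (Or.inr rfl) hA1 hchar1
    rw [heq2]
    refine ih A2 _ hlen2 (fun i hi => hR i (List.mem_cons_of_mem _ hi)) hA2 hchar2 ?_
    rintro i h0 h1 hD ⟨a, hc, ha0, ha1, har, hnin⟩
    by_cases haidx : a = idx
    · subst haidx
      rcases hc with h | h
      · have : i = a + 1 := by omega
        subst this
        exact hg2 h0 h1 hD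
      · have : i = a - 1 := by omega
        subst this
        exact hsub2 _ (hg1 h0 h1 hD)
    · have hnR : a ∉ idx :: R' := by
        intro hmem
        rcases List.mem_cons.1 hmem with h | h
        · exact haidx h
        · exact hnin h
      exact hsub2 _ (hsub1 _ (hprog i h0 h1 hD ⟨a, hc, ha0, ha1, har, hnR⟩))

theorem azWhile_spec (L : List Int) (hz : azZeros L ≠ []) :
    ∀ (d : Nat) (r : Int) (l q : List Int) (turns : Int),
      0 ≤ r → r + d = azM L + 1 →
      l.length = L.length →
      (∀ i : Int, 0 ≤ i → i < (L.length : Int) →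
        (PySem.List.pyGetD l i 0 = 0 ↔ azD L i ≤ r)) →
      (∀ i : Int, i ∈ q ↔ 0 ≤ i ∧ i < (L.length : Int) ∧ azD L i = r) →
      azWhile l q turns = turns + d - 1 := by
  intro d
  induction d with
  | zero =>
    intro r l q turns hr0 hrd hlen hchar hq
    have hqnil : q = [] := by
      rw [List.eq_nil_iff_forall_not_mem]
      intro i hi
      obtain ⟨h0, h1, hD⟩ := (hq i).1 hi
      have := azM_ge hz h0 h1
      push_cast at hrd
      omega
    subst hqnil
    rw [azWhile]
    simp only [dite_true]
    push_cast
    ring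
  | succ d ih =>
    intro r l q turns hr0 hrd hlen hchar hq
    have hrM : r + d = azM L := by push_cast at hrd; omega
    have hqne : q ≠ [] := by
      obtain ⟨i, h0, h1, hD⟩ := exists_level hz d r hr0 hrM
      intro hnil
      have := (hq i).2 ⟨h0, h1, hD⟩
      rw [hnil] at this
      simp at this
    rw [azWhile]
    simp only [dif_neg hqne]
    have hround := azRound_spec L hz r hr0 q [] l hlen
      (fun i hi => (hq i).1 hi)
      (by simp)
      (fun i h0 h1 => by rw [hchar i h0 h1]; simp)
      (by
        rintro i h0 h1 hD ⟨a, hc, ha0, ha1, har, hnin⟩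
        exact absurd ((hq a).2 ⟨ha0, ha1, har⟩) hnin)
    rw [List.append_nil] at hround
    obtain ⟨hlen', hchar', hq'⟩ := hround
    have := ih (r + 1) (azRound q.length (l, q)).1 (azRound q.length (l, q)).2 (turns + 1)
      (by omega) (by push_cast at hrd ⊢; omega) hlen' hchar' hq'
    rw [this]
    push_cast
    ring

-- ===== VERDICT (by name: the statement is the Claim_ definition above) =====
theorem infected_zeroes_spec : Claim_equal_infected_zeroes := by
  intro L _
  unfold Spec_infected_zeroes
  rw [alt_eq]
  by_cases hz : azZeros L = []
  · simp only [hz, if_pos]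
    unfold infected_zeroes
    rw [hz, azWhile]
    simp
  · simp only [hz, if_false]
    have hM0 : 0 ≤ azM L := by
      obtain ⟨i, _, _, hi⟩ := azM_exists hz
      have := azD_nonneg hz i; omega
    unfold infected_zeroes
    have := azWhile_spec L hz (azM L + 1).toNat 0 L (azZeros L) 0
      (le_refl 0) (by omega) rfl
      (fun i h0 h1 => by
        rw [pyGetD_zero_iff_mem h0 h1, ← azD_zero_iff hz i]
        have := azD_nonneg hz i
        constructor <;> intro h <;> omega)
      (fun i => by
        constructor
        · intro hi
          obtain ⟨hr0, hr1⟩ := azZeros_range hi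
          exact ⟨hr0, hr1, (azD_zero_iff hz i).2 hi⟩
        · rintro ⟨_, _, hd⟩
          exact (azD_zero_iff hz i).1 hd)
    rw [this]; omega
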